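-- pv_equiv track=rewrite | github.com/Lzino/TIL_Today-I-Learned | Coding_test/250901_String_compression.py | compress_with_k
-- ===== SOURCE A (Python) =====
-- def compress_with_k(s, k):
--     """
--     s를 길이 k로 잘라 압축한 문자열의 길이를 반환.
--     실제 압축 문자열을 만들지 않고 길이만 계산해도 되지만,
--     이해를 돕기 위해 문자열을 만들어본 뒤 len()을 씁니다.
--     """
--     pieces = []               # 압축 결과를 이어 붙일 버퍼
--     prev = s[0:k]             # 직전 조각
--     count = 1                 # prev가 몇 번 반복되었는지
--
--     # k 간격으로 순회하며 조각 비교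
--     for i in range(k, len(s), k):
--         cur = s[i:i+k]
--         if cur == prev:
--             count += 1
--         else:
--             # 지금까지의 prev를 압축해 pieces에 기록
--             if count > 1:
--                 pieces.append(str(count))
--             pieces.append(prev)
--             # 현재 조각으로 초기화
--             prev = cur
--             count = 1
--
--     # 마지막 prev도 반영
--     if count > 1:
--         pieces.append(str(count))
--     pieces.append(prev)
--
--     # 이어붙인 뒤 길이 반환
--     return len("".join(pieces))
-- ===== SOURCE B (Python) =====
-- def compress_with_k(s, k):
--     # Chunk-first: materialize the k-chunks, then sum per-run contributions
--     # (len(chunk) + digits of the run length) without ever building the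
--     # compressed string.
--     chunks = [s[i:i+k] for i in range(0, len(s), k)]
--
--     def total(cs):
--         if not cs:
--             return 0
--         run = 1
--         while run < len(cs) and cs[run] == cs[0]:
--             run += 1
--         return len(cs[0]) + (len(str(run)) if run > 1 else 0) + total(cs[run:])
--
--     return total(chunks)
-- ===== Notes on version B (the rewrite author's own statement) =====
-- stated objective: alternative
-- what changed: A builds the compressed string piece by piece with a prev/count accumulator and a final join+len; B first materializes the list of k-chunks, then recursively sums each run's contribution (chunk length plus digit count of the run length) without ever constructing a string.
-- intended difference: For negative k with len(s) > |k|, A returns len(s)+k (the length of its slicing seed s[0:k], an implementation artefact) while B sees no chunks and returns 0, the intended value for a chunk size that yields no chunks. — e.g. on compress_with_k("abc", -1): A returns 2, B returns 0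
import Mathlib
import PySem

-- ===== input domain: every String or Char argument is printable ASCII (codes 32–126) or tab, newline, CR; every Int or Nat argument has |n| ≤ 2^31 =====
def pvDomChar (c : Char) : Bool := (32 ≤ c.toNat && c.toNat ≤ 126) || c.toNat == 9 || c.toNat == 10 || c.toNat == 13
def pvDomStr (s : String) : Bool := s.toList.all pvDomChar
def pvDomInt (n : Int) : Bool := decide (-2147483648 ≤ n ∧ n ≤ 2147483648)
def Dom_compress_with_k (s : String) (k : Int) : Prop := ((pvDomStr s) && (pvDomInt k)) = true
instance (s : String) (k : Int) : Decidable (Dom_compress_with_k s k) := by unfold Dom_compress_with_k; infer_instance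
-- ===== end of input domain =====

-- B replaces A's string-building (pieces buffer + join + len) by a chunk list scanned run-by-run,
-- summing each run's length contribution directly (objective: alternative decomposition, no speed claim).


-- ===== PORT A =====
-- A's loop body, named so the proofs can speak about it (same branches, same state).
def pvStepA (acc : List (List Char) × List Char × Int) (cur : List Char) :
    List (List Char) × List Char × Int :=
  if cur = acc.2.1 then (acc.1, acc.2.1, acc.2.2 + 1)
  else (acc.1 ++ (if acc.2.2 > 1 then [PySem.Int.toChars acc.2.2] else []) ++ [acc.2.1], cur, 1)

-- the epilogue after the loop: flush the last run and return len("".join(pieces))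
def pvFinish (st : List (List Char) × List Char × Int) : Int :=
  ((PySem.Chars.join []
    (st.1 ++ (if st.2.2 > 1 then [PySem.Int.toChars st.2.2] else []) ++ [st.2.1])).length : Int)

def compress_with_k (s : String) (k : Int) : Int :=
  pvFinish ((PySem.List.pyRange k (s.toList.length : Int) k).foldl
    (fun acc i => pvStepA acc (PySem.List.slice s.toList (some i) (some (i + k))))
    ([], PySem.List.slice s.toList (some 0) (some k), 1))

-- ===== PORT B =====
-- total(cs) from Source B: run = 1 + number of leading chunks equal to cs[0], recurse on cs[run:].
def pvRunTotal : List (List Char) → Int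
  | [] => 0
  | c :: rest =>
    let t := (rest.takeWhile (fun y => y == c)).length
    (c.length : Int)
      + (if ((t : Int) + 1) > 1 then ((PySem.Int.toChars ((t : Int) + 1)).length : Int) else 0)
      + pvRunTotal (rest.drop t)
termination_by cs => cs.length
decreasing_by simp

def pvChunks (cs : List Char) (k : Int) : List (List Char) :=
  (PySem.List.pyRange 0 (cs.length : Int) k).map
    (fun i => PySem.List.slice cs (some i) (some (i + k)))

def compress_with_k_alt (s : String) (k : Int) : Int :=
  pvRunTotal (pvChunks s.toList k)

-- ===== PRECONDITION & SPEC =====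
-- Pre_ excludes exactly k = 0, on which A's range(k, len(s), k) raises ValueError.
def Pre_compress_with_k (s : String) (k : Int) : Prop := k ≠ 0
instance (s : String) (k : Int) : Decidable (Pre_compress_with_k s k) := by unfold Pre_compress_with_k; infer_instance
def pvWitness_compress_with_k : String × Int := ("aabba", 2)

-- For negative k with len(s) > |k|, A returns len(s)+k — the length of its slicing seed s[0:k], an
-- artefact — while B, seeing no chunks, returns 0, the intended value for a chunk size yielding no chunks.
def D_compress_with_k (s : String) (k : Int) : Prop := k < 0 ∧ (s.toList.length : Int) + k > 0
instance (s : String) (k : Int) : Decidable (D_compress_with_k s k) := by unfold D_compress_with_k; infer_instance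

def Spec_compress_with_k (s : String) (k : Int) (out : Int) : Prop :=
  ¬ D_compress_with_k s k → out = compress_with_k_alt s k
instance (s : String) (k : Int) (out : Int) : Decidable (Spec_compress_with_k s k out) := by unfold Spec_compress_with_k; infer_instance

def pvDiffWitness_compress_with_k : String × Int := ("abc", -1)
def pvDiffWitnessOut_compress_with_k : Int × Int := (2, 0)

-- ===== CLAIM (what is proved, stated in full; the proofs are below) =====
def Claim_unchanged_compress_with_k : Prop := ∀ (s : String) (k : Int), Dom_compress_with_k s k → Pre_compress_with_k s k → Spec_compress_with_k s k (compress_with_k s k)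
def Claim_changed_compress_with_k : Prop := Dom_compress_with_k (pvDiffWitness_compress_with_k.1) (pvDiffWitness_compress_with_k.2) ∧ Pre_compress_with_k (pvDiffWitness_compress_with_k.1) (pvDiffWitness_compress_with_k.2) ∧ D_compress_with_k (pvDiffWitness_compress_with_k.1) (pvDiffWitness_compress_with_k.2) ∧ compress_with_k (pvDiffWitness_compress_with_k.1) (pvDiffWitness_compress_with_k.2) = pvDiffWitnessOut_compress_with_k.1 ∧ compress_with_k_alt (pvDiffWitness_compress_with_k.1) (pvDiffWitness_compress_with_k.2) = pvDiffWitnessOut_compress_with_k.2 ∧ pvDiffWitnessOut_compress_with_k.1 ≠ pvDiffWitnessOut_compress_with_k.2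
def Claim_exact_compress_with_k : Prop := ∀ (s : String) (k : Int), Dom_compress_with_k s k → Pre_compress_with_k s k → D_compress_with_k s k → compress_with_k s k ≠ compress_with_k_alt s k

-- ===== LEMMAS AND PROOFS =====

def pvSumLen (ps : List (List Char)) : Int := (ps.map (fun p => (p.length : Int))).sum

-- contribution of the rest of A's loop, given the current run key and count
def pvG (prev : List Char) (count : Int) : List (List Char) → Int
  | [] => (if count > 1 then ((PySem.Int.toChars count).length : Int) else 0) + (prev.length : Int)
  | c :: rest =>
    if c = prev then pvG prev (count + 1) rest
    else ((if count > 1 then ((PySem.Int.toChars count).length : Int) else 0) + (prev.length : Int))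
         + pvG c 1 rest

lemma pvSumLen_append (ps qs : List (List Char)) : pvSumLen (ps ++ qs) = pvSumLen ps + pvSumLen qs := by
  simp [pvSumLen]

lemma pvJoinLen (ps : List (List Char)) : ((PySem.Chars.join [] ps).length : Int) = pvSumLen ps := by
  induction ps with
  | nil => simp [PySem.Chars.join_nil, pvSumLen]
  | cons p rest ih =>
    cases rest with
    | nil => simp [PySem.Chars.join_singleton, pvSumLen]
    | cons q t =>
      rw [PySem.Chars.join_cons_cons]
      simp only [pvSumLen, List.map_cons, List.sum_cons] at ih ⊢
      simp only [List.length_append, List.length_nil]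
      push_cast at ih ⊢
      omega

lemma pvA_loop (cs : List (List Char)) : ∀ (pieces : List (List Char)) (prev : List Char) (count : Int),
    pvFinish (cs.foldl pvStepA (pieces, prev, count)) = pvSumLen pieces + pvG prev count cs := by
  induction cs with
  | nil =>
    intro pieces prev count
    simp only [List.foldl_nil, pvFinish, pvG]
    rw [pvJoinLen, pvSumLen_append, pvSumLen_append]
    split_ifs <;> simp [pvSumLen] <;> try omega
  | cons c rest ih =>
    intro pieces prev count
    by_cases h : c = prev
    · have hstep : pvStepA (pieces, prev, count) c = (pieces, prev, count + 1) := by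
        simp [pvStepA, h]
      have hg : pvG prev count (c :: rest) = pvG prev (count + 1) rest := by
        simp [pvG, h]
      rw [List.foldl_cons, hstep, hg, ih]
    · have hstep : pvStepA (pieces, prev, count) c
          = (pieces ++ (if count > 1 then [PySem.Int.toChars count] else []) ++ [prev], c, 1) := by
        simp [pvStepA, h]
      have hg : pvG prev count (c :: rest)
          = ((if count > 1 then ((PySem.Int.toChars count).length : Int) else 0) + (prev.length : Int))
            + pvG c 1 rest := by
        simp [pvG, h]
      rw [List.foldl_cons, hstep, hg, ih]
      rw [pvSumLen_append, pvSumLen_append]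
      split_ifs <;> simp [pvSumLen] <;> try omega <;> try omega

lemma pvG_run (cs : List (List Char)) : ∀ (prev : List Char) (count : Int), 1 ≤ count →
    pvG prev count cs =
      (if count + ((cs.takeWhile (fun y => y == prev)).length : Int) > 1
       then ((PySem.Int.toChars (count + ((cs.takeWhile (fun y => y == prev)).length : Int))).length : Int)
       else 0)
      + (prev.length : Int)
      + pvRunTotal (cs.drop (cs.takeWhile (fun y => y == prev)).length) := by
  induction cs with
  | nil => intro prev count _; simp [pvG, pvRunTotal]
  | cons c rest ih =>
    intro prev count hc
    by_cases h : c = prev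
    · have htw : (c :: rest).takeWhile (fun y => y == prev) = c :: rest.takeWhile (fun y => y == prev) := by
        simp [h]
      simp only [pvG, if_pos h]
      rw [ih prev (count + 1) (by omega), htw]
      simp only [List.length_cons, List.drop_succ_cons]
      have harg : count + ((((rest.takeWhile (fun y => y == prev)).length + 1 : Nat)) : Int)
           = count + 1 + ((rest.takeWhile (fun y => y == prev)).length : Int) := by push_cast; ring
      rw [harg]
    · have htw : (c :: rest).takeWhile (fun y => y == prev) = [] := by
        simp [h]
      simp only [pvG, if_neg h]
      rw [ih c 1 (by omega), htw]
      simp only [List.length_nil, List.drop_zero, Nat.cast_zero, add_zero, pvRunTotal]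
      have h1 : (1 : Int) + ((rest.takeWhile (fun y => y == c)).length : Int)
              = ((rest.takeWhile (fun y => y == c)).length : Int) + 1 := by ring
      rw [h1]
      ring

lemma pvRun_eq_pvG (c : List Char) (rest : List (List Char)) :
    pvRunTotal (c :: rest) = pvG c 1 rest := by
  rw [pvG_run rest c 1 (by omega)]
  simp only [pvRunTotal]
  have h1 : (1 : Int) + ((rest.takeWhile (fun y => y == c)).length : Int)
          = ((rest.takeWhile (fun y => y == c)).length : Int) + 1 := by ring
  rw [h1]
  ring

-- range cons for a positive step
lemma pvRange_cons {a b s : Int} (hs : 0 < s) (hab : a < b) :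
    PySem.List.pyRange a b s = a :: PySem.List.pyRange (a + s) b s := by
  rw [PySem.List.pyRange_of_pos a b hs, PySem.List.pyRange_of_pos (a + s) b hs]
  have hd1 : b - a + s - 1 = (b - a - 1) + 1 * s := by ring
  have hnn : 0 ≤ (b - a - 1) / s := Int.ediv_nonneg (by omega) (by omega)
  have hcount : ((b - a + s - 1) / s).toNat = ((b - a - 1) / s).toNat + 1 := by
    rw [hd1, Int.add_mul_ediv_right _ _ (by omega : s ≠ 0)]
    omega
  by_cases hlt : a + s < b
  · have hsame : b - (a + s) + s - 1 = b - a - 1 := by ring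
    rw [if_pos hab, if_pos hlt, hsame, hcount, List.range_succ_eq_map]
    simp only [List.map_cons, List.map_map, Nat.cast_zero, mul_zero, add_zero]
    congr 1
    apply List.map_congr_left
    intro x _
    simp only [Function.comp_apply]
    push_cast
    ring
  · have hz : (b - a - 1) / s = 0 := Int.ediv_eq_zero_of_lt (by omega) (by omega)
    rw [if_pos hab, if_neg hlt, hcount, hz]
    simp

-- a range with negative step and stop ≥ start is empty
lemma pvRange_neg_nil {a b s : Int} (hs : s < 0) (h : ¬ b < a) :
    PySem.List.pyRange a b s = [] := by
  simp only [PySem.List.pyRange, if_neg (by omega : ¬ s = 0)]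
  rw [if_neg (by omega : ¬ 0 < s), if_neg h]
  simp

-- A = B for positive k
lemma pvPos (s : String) (k : Int) (hk : 0 < k) :
    compress_with_k s k = compress_with_k_alt s k := by
  unfold compress_with_k compress_with_k_alt pvChunks
  by_cases h0 : s.toList.length = 0
  · have hA : PySem.List.pyRange k ((s.toList.length : Nat) : Int) k = [] := by
      rw [h0, Nat.cast_zero, PySem.List.pyRange_of_pos k 0 hk, if_neg (by omega : ¬ k < 0)]
      simp
    have hB : PySem.List.pyRange 0 ((s.toList.length : Nat) : Int) k = [] := by
      rw [h0, Nat.cast_zero, PySem.List.pyRange_of_pos 0 0 hk, if_neg (by omega : ¬ (0:Int) < 0)]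
      simp
    have hsl : PySem.List.slice s.toList (some 0) (some k) = [] := by
      have he : s.toList = [] := List.length_eq_zero_iff.mp h0
      simp [he, PySem.List.slice]
    rw [hA, hB]
    simp [pvFinish, hsl, pvRunTotal, PySem.Chars.join_singleton]
  · have hlen : (0 : Int) < ((s.toList.length : Nat) : Int) := by
      have : 0 < s.toList.length := Nat.pos_of_ne_zero h0
      exact_mod_cast this
    rw [pvRange_cons hk hlen, List.map_cons, zero_add, pvRun_eq_pvG,
      ← List.foldl_map (f := fun i => PySem.List.slice s.toList (some i) (some (i + k)))
        (g := pvStepA), pvA_loop]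
    simp [pvSumLen]

-- both ports return 0 for negative k with no surviving prefix
lemma pvNegNil (s : String) (k : Int) (hk : k < 0) (hn : (s.toList.length : Int) + k ≤ 0) :
    compress_with_k s k = 0 ∧ compress_with_k_alt s k = 0 := by
  unfold compress_with_k compress_with_k_alt pvChunks
  have hA : PySem.List.pyRange k ((s.toList.length : Nat) : Int) k = [] :=
    pvRange_neg_nil hk (by omega)
  have hB : PySem.List.pyRange 0 ((s.toList.length : Nat) : Int) k = [] :=
    pvRange_neg_nil hk (by omega)
  have hb2 : PySem.List.clampIdx s.toList.length k = 0 := by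
    simp only [PySem.List.clampIdx, if_pos hk]
    split_ifs <;> omega
  have ha2 : PySem.List.clampIdx s.toList.length 0 = 0 := by
    simp [PySem.List.clampIdx]
  have hsl : PySem.List.slice s.toList (some 0) (some k) = [] := by
    show List.take (PySem.List.clampIdx s.toList.length k - PySem.List.clampIdx s.toList.length 0)
      (List.drop (PySem.List.clampIdx s.toList.length 0) s.toList) = []
    rw [ha2, hb2]
    simp
  rw [hA, hB]
  constructor
  · simp [pvFinish, hsl, PySem.Chars.join_singleton]
  · simp [pvRunTotal]

-- inside D_: A returns len(s)+k, B returns 0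
lemma pvNegD (s : String) (k : Int) (hk : k < 0) (hn : 0 < (s.toList.length : Int) + k) :
    compress_with_k s k = (s.toList.length : Int) + k ∧ compress_with_k_alt s k = 0 := by
  unfold compress_with_k compress_with_k_alt pvChunks
  have hA : PySem.List.pyRange k ((s.toList.length : Nat) : Int) k = [] :=
    pvRange_neg_nil hk (by omega)
  have hB : PySem.List.pyRange 0 ((s.toList.length : Nat) : Int) k = [] :=
    pvRange_neg_nil hk (by omega)
  rw [hA, hB]
  have hlen : (PySem.List.slice s.toList (some 0) (some k)).length
      = ((s.toList.length : Int) + k).toNat := by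
    rw [PySem.List.length_slice]
    have hb2 : PySem.List.clampIdx s.toList.length k = ((s.toList.length : Int) + k).toNat := by
      simp only [PySem.List.clampIdx, if_pos hk]
      rw [if_neg (by omega : ¬ ((s.toList.length : Nat) : Int) + k < 0)]
    have ha2 : PySem.List.clampIdx s.toList.length 0 = 0 := by
      simp [PySem.List.clampIdx]
    rw [hb2, ha2]
    omega
  constructor
  · simp only [List.foldl_nil, pvFinish]
    rw [if_neg (by omega : ¬ (1 : Int) > 1)]
    simp only [List.append_nil, List.nil_append, PySem.Chars.join_singleton]
    rw [hlen]
    omega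
  · simp [pvRunTotal]

-- ===== VERDICT (by name: the statement is the Claim_ definition above) =====
theorem compress_with_k_spec : Claim_unchanged_compress_with_k := by
  intro s k _ hpre hnd
  unfold Pre_compress_with_k at hpre
  unfold D_compress_with_k at hnd
  rcases lt_or_gt_of_ne hpre with hneg | hpos
  · have hn : (s.toList.length : Int) + k ≤ 0 := by
      by_contra h
      exact hnd ⟨hneg, by omega⟩
    have := pvNegNil s k hneg hn
    omega
  · exact pvPos s k hpos

theorem compress_with_k_changed : Claim_changed_compress_with_k := by
  unfold Claim_changed_compress_with_k
  refine ⟨by decide, by decide, by decide, by decide, ?_, by decide⟩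
  exact (pvNegD "abc" (-1) (by decide) (by decide)).2

theorem compress_with_k_tight : Claim_exact_compress_with_k := by
  intro s k _ _ hd
  obtain ⟨hk, hn⟩ := hd
  have := pvNegD s k hk hn
  omega
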